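-- pv_equiv track=rewrite | github.com/aorursy/KT_dataset_py | siyabongamatchaba_covid-19-document-comparison-tf-idf-and-k-nearest.py | frequency2
-- ===== SOURCE A (Python) =====
-- def frequency2(newList):
--     d = {}
--     wID = 0
--     for t in newList:
--         try:
--             elem = d[t]
--         except:
--             elem = [wID,0]
--             wID = wID + 1
--         elem[1] = elem[1] + 1
--         d[t] = elem
--     return d
-- ===== SOURCE B (Python) =====
-- def frequency2(newList):
--     # pass 1: count every token
--     counts = {}
--     for t in newList:
--         counts[t] = counts.get(t, 0) + 1
--     # pass 2: assign word IDs in first-appearance order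
--     return {t: [i, c] for i, (t, c) in enumerate(counts.items())}
-- ===== Notes on version B (the rewrite author's own statement) =====
-- stated objective: idiomatic
-- what changed: Replaces the interleaved try/except lookup that assigns a word ID and bumps a count in one pass by a two-pass count-then-enumerate structure: first a plain counting dict, then IDs assigned by enumerating the unique tokens in first-appearance order.
import Mathlib
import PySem

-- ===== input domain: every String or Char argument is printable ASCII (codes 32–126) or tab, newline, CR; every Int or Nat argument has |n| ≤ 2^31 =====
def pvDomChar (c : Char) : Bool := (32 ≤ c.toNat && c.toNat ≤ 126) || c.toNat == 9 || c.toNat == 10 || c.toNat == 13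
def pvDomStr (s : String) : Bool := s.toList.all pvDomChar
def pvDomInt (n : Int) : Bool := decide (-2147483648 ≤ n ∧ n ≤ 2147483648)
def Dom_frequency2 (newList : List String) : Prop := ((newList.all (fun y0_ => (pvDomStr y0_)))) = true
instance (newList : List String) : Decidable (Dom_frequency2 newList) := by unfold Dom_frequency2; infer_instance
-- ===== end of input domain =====

-- B replaces A's interleaved try/except one-pass ID-and-count loop by an idiomatic
-- count-then-enumerate two-pass structure; same cost, same return value.

-- ===== PORT A =====
-- loop body of A (d, wID are the two mutable variables; elem is always a 2-list, so
-- elem[1] is PySem.List.pyGet? elem 1, which is always `some`)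
def stepA (st : PySem.Dict String (List Int) × Int) (t : String) :
    PySem.Dict String (List Int) × Int :=
  match st.1.get? t with                                   -- try: elem = d[t]
  | some elem0 =>
      let elem := elem0.set 1 (((PySem.List.pyGet? elem0 1).getD 0) + 1)  -- elem[1] = elem[1]+1
      (st.1.insert t elem, st.2)                           -- d[t] = elem
  | none =>                                                -- except: elem = [wID, 0]; wID += 1
      let elem0 : List Int := [st.2, 0]
      let elem := elem0.set 1 (((PySem.List.pyGet? elem0 1).getD 0) + 1)
      (st.1.insert t elem, st.2 + 1)

def frequency2 (newList : List String) : List (String × List Int) :=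
  (newList.foldl stepA (PySem.Dict.empty, 0)).1.items

-- ===== PORT B =====
def frequency2_alt (newList : List String) : List (String × List Int) :=
  -- pass 1: counts[t] = counts.get(t, 0) + 1
  let counts := newList.foldl
    (fun (d : PySem.Dict String Int) t => d.insert t (d.getD t 0 + 1)) PySem.Dict.empty
  -- pass 2: {t: [i, c] for i, (t, c) in enumerate(counts.items())}
  (PySem.List.enumerate counts.items 0).map (fun q => (q.2.1, ([q.1, q.2.2] : List Int)))

-- ===== PRECONDITION & SPEC =====
def Spec_frequency2 (newList : List String) (out : List (String × List Int)) : Prop := out = frequency2_alt newList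
instance (newList : List String) (out : List (String × List Int)) : Decidable (Spec_frequency2 newList out) := by unfold Spec_frequency2; infer_instance

-- ===== CLAIM (what is proved, stated in full; the proofs are below) =====
def Claim_equal_frequency2 : Prop := ∀ (newList : List String), Dom_frequency2 newList → Spec_frequency2 newList (frequency2 newList)

-- ===== LEMMAS AND PROOFS =====

-- the common normal form: unique tokens S in first-appearance order, IDs from i, counts from p
def gIdx : List String → Int → List String → List (String × List Int)
  | [], _, _ => []
  | x :: rest, i, p => (x, [i, (p.count x : Int)]) :: gIdx rest (i + 1) p

theorem gIdx_no_t (S : List String) (i : Int) (p : List String) (t : String)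
    (h : ∀ x ∈ S, x ≠ t) : gIdx S i (p ++ [t]) = gIdx S i p := by
  induction S generalizing i with
  | nil => rfl
  | cons x rest ih =>
      have hx : x ≠ t := h x (List.mem_cons_self ..)
      rw [gIdx, gIdx, ih (i + 1) (fun y hy => h y (List.mem_cons_of_mem _ hy))]
      have hc : (p ++ [t]).count x = p.count x := by
        simp [List.count_append, Ne.symm hx]
      rw [hc]

theorem gIdx_append (S : List String) (i : Int) (p : List String) (t : String) :
    gIdx (S ++ [t]) i p = gIdx S i p ++ [(t, [i + (S.length : Int), (p.count t : Int)])] := by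
  induction S generalizing i with
  | nil => simp [gIdx]
  | cons x rest ih =>
      simp [gIdx, ih (i + 1)]
      ring_nf

theorem get?_gIdx_none (S : List String) (i : Int) (p : List String) (t : String)
    (h : t ∉ S) : (PySem.Dict.mk (gIdx S i p)).get? t = none := by
  induction S generalizing i with
  | nil => rfl
  | cons x rest ih =>
      have hx : ¬ (x == t) = true := by
        simp only [beq_iff_eq]; rintro rfl; exact h (List.mem_cons_self ..)
      rw [gIdx, PySem.Dict.get?_mk_cons]
      simp only [hx]
      exact ih (i + 1) (fun hm => h (List.mem_cons_of_mem _ hm))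

theorem contains_gIdx (S : List String) (i : Int) (p : List String) (t : String) :
    (PySem.Dict.mk (gIdx S i p)).contains t = S.contains t := by
  induction S generalizing i with
  | nil => rfl
  | cons x rest ih =>
      simp only [gIdx, PySem.Dict.contains_mk, List.any_cons, List.contains_cons]
      simp only [PySem.Dict.contains_mk] at ih
      rw [ih (i + 1)]
      simp [Bool.beq_comm]

theorem lb (S : List String) (i : Int) (p : List String) (t : String)
    (hnd : S.Nodup) (ht : t ∈ S) :
    ∃ j : Int, (PySem.Dict.mk (gIdx S i p)).get? t = some [j, (p.count t : Int)] ∧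
      ((PySem.Dict.mk (gIdx S i p)).insert t [j, (p.count t : Int) + 1]).items
        = gIdx S i (p ++ [t]) := by
  induction S generalizing i with
  | nil => cases ht
  | cons x rest ih =>
      have hcont : (PySem.Dict.mk (gIdx (x :: rest) i p)).contains t = true := by
        rw [contains_gIdx]; simpa using ht
      by_cases hxt : x = t
      · subst hxt
        refine ⟨i, ?_, ?_⟩
        · rw [gIdx, PySem.Dict.get?_mk_cons]; simp
        · rw [PySem.Dict.items_insert_of_contains _ _ hcont]
          have hrest : ∀ y ∈ rest, y ≠ x := fun y hy heq => by
            exact (List.nodup_cons.mp hnd).1 (heq ▸ hy)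
          have htail : (gIdx rest (i + 1) p).map
              (fun q => if q.1 == x then (x, [i, (p.count x : Int) + 1]) else q)
              = gIdx rest (i + 1) p := by
            rw [List.map_congr_left (g := id), List.map_id]
            intro q hq
            have : q.1 ∈ (gIdx rest (i + 1) p).map Prod.fst := List.mem_map_of_mem hq
            have hkeys : ∀ T j, (gIdx T j p).map Prod.fst = T := by
              intro T; induction T with
              | nil => intro j; rfl
              | cons z zs ihz => intro j; simp [gIdx, ihz]
            rw [hkeys] at this
            simp [hrest q.1 this]
          simp only [gIdx, List.map_cons, BEq.rfl, if_true, htail]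
          rw [gIdx_no_t rest (i+1) p x hrest]
          simp [List.count_append]
      · have htr : t ∈ rest := by
          rcases List.mem_cons.mp ht with h | h
          · exact absurd h.symm hxt
          · exact h
        obtain ⟨j, hg, hins⟩ := ih (i + 1) (List.nodup_cons.mp hnd).2 htr
        refine ⟨j, ?_, ?_⟩
        · rw [gIdx, PySem.Dict.get?_mk_cons]
          simp only [beq_iff_eq, hxt, if_false]
          exact hg
        · have hcont' : (PySem.Dict.mk (gIdx rest (i + 1) p)).contains t = true := by
            rw [contains_gIdx]; simpa using htr
          rw [PySem.Dict.items_insert_of_contains _ _ hcont]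
          rw [PySem.Dict.items_insert_of_contains _ _ hcont'] at hins
          have hxne : ¬ ((x : String) == t) = true := by simpa using hxt
          simp only [gIdx, List.map_cons, hxne]
          rw [hins]
          have hcnt : (p ++ [t]).count x = p.count x := by
            simp [List.count_append, Ne.symm hxt]
          simp [hcnt]

theorem inv (l : List String) : ∀ (p : List String),
    l.foldl stepA (PySem.Dict.mk (gIdx (PySem.Set.ofList p) 0 p),
        ((PySem.Set.ofList p).length : Int))
    = (PySem.Dict.mk (gIdx (PySem.Set.ofList (p ++ l)) 0 (p ++ l)),
        ((PySem.Set.ofList (p ++ l)).length : Int)) := by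
  induction l with
  | nil => intro p; simp
  | cons t l' ih =>
      intro p
      have hassoc : p ++ t :: l' = (p ++ [t]) ++ l' := by simp
      rw [List.foldl_cons, hassoc, ← ih (p ++ [t])]
      congr 1
      by_cases ht : t ∈ PySem.Set.ofList p
      · obtain ⟨j, hg, hins⟩ :=
          lb (PySem.Set.ofList p) 0 p t (PySem.Set.nodup_ofList p) ht
        have hset : PySem.Set.ofList (p ++ [t]) = PySem.Set.ofList p := by
          rw [PySem.Set.ofList_append_singleton, PySem.Set.add_of_mem ht]
        rw [stepA, hg]
        simp only [hset, Prod.mk.injEq]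
        refine ⟨?_, trivial⟩
        apply PySem.Dict.ext
        simpa [PySem.List.pyGet?, PySem.List.pyIdx?] using hins
      · have hg := get?_gIdx_none (PySem.Set.ofList p) 0 p t ht
        have hset : PySem.Set.ofList (p ++ [t]) = PySem.Set.ofList p ++ [t] := by
          rw [PySem.Set.ofList_append_singleton, PySem.Set.add_of_not_mem ht]
        have hcont : (PySem.Dict.mk (gIdx (PySem.Set.ofList p) 0 p)).contains t = false := by
          rw [contains_gIdx]; simpa using ht
        rw [stepA, hg]
        simp only [Prod.mk.injEq]
        refine ⟨?_, ?_⟩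
        · apply PySem.Dict.ext
          rw [PySem.Dict.items_insert_of_not_contains _ _ hcont]
          rw [hset, gIdx_append]
          have hpt : t ∉ p := fun hm => ht ((PySem.Set.mem_ofList ..).mpr hm)
          have hnot : ∀ x ∈ PySem.Set.ofList p, x ≠ t := by
            intro x hx heq; exact ht (heq ▸ hx)
          rw [gIdx_no_t _ _ _ _ hnot]
          simp [PySem.List.pyGet?, PySem.List.pyIdx?, List.count_append,
            List.count_eq_zero.mpr hpt]
        · rw [hset]; simp only [List.length_append, List.length_singleton]; push_cast; omega

theorem frequency2_eq_gIdx (newList : List String) :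
    frequency2 newList = gIdx (PySem.Set.ofList newList) 0 newList := by
  have h := inv newList []
  simp only [List.nil_append] at h
  unfold frequency2
  rw [show ((PySem.Dict.empty : PySem.Dict String (List Int)), (0 : Int))
        = (PySem.Dict.mk (gIdx (PySem.Set.ofList ([] : List String)) 0 []),
           ((PySem.Set.ofList ([] : List String)).length : Int)) from rfl, h]

theorem enumerate_map {α β : Type} (l : List α) (f : α → β) (s : Int) :
    PySem.List.enumerate (l.map f) s
      = (PySem.List.enumerate l s).map (fun q => (q.1, f q.2)) := by
  induction l generalizing s with
  | nil => rfl
  | cons x xs ih => simp [PySem.List.enumerate_cons, ih]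

theorem b_eq_gIdx (S : List String) (i : Int) (p : List String) :
    (PySem.List.enumerate (S.map (fun k => (k, (p.count k : Int)))) i).map
        (fun q => (q.2.1, ([q.1, q.2.2] : List Int)))
      = gIdx S i p := by
  rw [enumerate_map]
  induction S generalizing i with
  | nil => rfl
  | cons x rest ih => simp [PySem.List.enumerate_cons, gIdx, ih]

theorem frequency2_alt_eq_gIdx (newList : List String) :
    frequency2_alt newList = gIdx (PySem.Set.ofList newList) 0 newList := by
  show (PySem.List.enumerate (newList.foldl
      (fun (d : PySem.Dict String Int) t => d.insert t (d.getD t 0 + 1))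
      PySem.Dict.empty).items 0).map (fun q => (q.2.1, ([q.1, q.2.2] : List Int)))
    = gIdx (PySem.Set.ofList newList) 0 newList
  rw [PySem.Dict.foldl_insert_getD_add_one_eq_counter, PySem.Dict.items_counter]
  exact b_eq_gIdx (PySem.Set.ofList newList) 0 newList

-- ===== VERDICT (by name: the statement is the Claim_ definition above) =====
theorem frequency2_spec : Claim_equal_frequency2 := by
  intro newList _
  unfold Spec_frequency2
  rw [frequency2_eq_gIdx, frequency2_alt_eq_gIdx]
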